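-- pv_equiv track=rewrite | github.com/jeffhj/LM_PersonalInfoLeak | analysis.py | get_pattern_type
-- ===== SOURCE A (Python) =====
-- def get_pattern_type(name,email):
--     name = name.lower()
--     local = email.split('@')[0].lower()
--
--     name = name.split()
--
--     if len(name)==1:
--         if name[0]==local:
--             return "a1"
--
--     elif len(name)==2:
--         # full name
--         if name[0]+'.'+name[-1]==local:
--             return "b1"
--         elif name[0]+'_'+name[-1]==local:
--             return "b2"
--         elif name[0]+name[-1]==local:
--             return "b3"
--
--         # half name
--         elif name[0]==local:
--             return "b4"
--         elif name[-1]==local: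
--             return "b5"
--
--         # initial + half name
--         elif name[0][0]+name[-1]==local:
--             return "b6"
--         elif name[0]+name[-1][0]==local:
--             return "b7"
--         elif name[-1][0]+name[0]==local:
--             return "b8"
--         elif name[-1]+name[0][0]==local:
--             return "b9"
--
--         # initials
--         elif ''.join([x[0] for x in name])==local:
--             return "b10"
--
--     elif len(name)==3:
--         if len(name[1])>1:
--             name[1] = name[1].strip('.')
--
--         # full name
--         if name[0]+'.'+name[-1]==local:
--             return "c1"
--         elif name[0]+'_'+name[-1]==local:
--             return "c2"
--         elif name[0]+name[-1]==local:
--             return "c3"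
--         elif '.'.join(name)==local:
--             return "c4"
--         elif '_'.join(name)==local:
--             return "c5"
--         elif ''.join(name)==local:
--             return "c6"
--
--         # half name
--         elif name[0]==local:
--             return "c7"
--         elif name[-1]==local:
--             return "c8"
--
--         # initial + half name
--         elif name[0][0]+name[-1]==local:
--             return "c9"
--         elif name[0]+name[-1][0]==local:
--             return "c10"
--         elif name[-1][0]+name[0]==local:
--             return "c11"
--         elif name[-1]+name[0][0]==local:
--             return "c12"
--         elif name[0][0]+name[1][0]+name[2]==local:
--             return "c13"
--         elif name[0][0]+name[1]+name[2]==local: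
--             return "c14"
--         elif '.'.join([name[0],name[1][0],name[2]])==local:
--             return "c15"
--         elif name[0]+'.'+name[1]+name[2]==local:
--             return "c16"
--
--         # initials
--         elif ''.join([x[0] for x in name])==local:
--             return "c17"
--
--     elif len(name)>3:
--         return "l"
--
--     return "z"
-- ===== SOURCE B (Python) =====
-- # B: pattern-interpreter. Each pattern is a token sequence (word i / initial i / literal s);
-- # a cursor-based matcher consumes the email local part token by token (startswith at offset),
-- # so no candidate strings are built and no whole-string equality tests are made.
--
-- W, I, L = 0, 1, 2  # token kinds: full word, first character, literal separator
--
-- PATTERNS = {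
--     1: [([(W, 0)], "a1")],
--     2: [([(W, 0), (L, '.'), (W, 1)], "b1"),
--         ([(W, 0), (L, '_'), (W, 1)], "b2"),
--         ([(W, 0), (W, 1)], "b3"),
--         ([(W, 0)], "b4"),
--         ([(W, 1)], "b5"),
--         ([(I, 0), (W, 1)], "b6"),
--         ([(W, 0), (I, 1)], "b7"),
--         ([(I, 1), (W, 0)], "b8"),
--         ([(W, 1), (I, 0)], "b9"),
--         ([(I, 0), (I, 1)], "b10")],
--     3: [([(W, 0), (L, '.'), (W, 2)], "c1"),
--         ([(W, 0), (L, '_'), (W, 2)], "c2"),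
--         ([(W, 0), (W, 2)], "c3"),
--         ([(W, 0), (L, '.'), (W, 1), (L, '.'), (W, 2)], "c4"),
--         ([(W, 0), (L, '_'), (W, 1), (L, '_'), (W, 2)], "c5"),
--         ([(W, 0), (W, 1), (W, 2)], "c6"),
--         ([(W, 0)], "c7"),
--         ([(W, 2)], "c8"),
--         ([(I, 0), (W, 2)], "c9"),
--         ([(W, 0), (I, 2)], "c10"),
--         ([(I, 2), (W, 0)], "c11"),
--         ([(W, 2), (I, 0)], "c12"),
--         ([(I, 0), (I, 1), (W, 2)], "c13"),
--         ([(I, 0), (W, 1), (W, 2)], "c14"),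
--         ([(W, 0), (L, '.'), (I, 1), (L, '.'), (W, 2)], "c15"),
--         ([(W, 0), (L, '.'), (W, 1), (W, 2)], "c16"),
--         ([(I, 0), (I, 1), (I, 2)], "c17")],
-- }
--
--
-- def _matches(local, words, toks):
--     pos = 0
--     for kind, v in toks:
--         piece = v if kind == L else (words[v] if kind == W else words[v][:1])
--         if not local.startswith(piece, pos):
--             return False
--         pos += len(piece)
--     return pos == len(local)
--
--
-- def get_pattern_type(name, email):
--     local = email.split('@')[0].lower()
--     words = name.lower().split()
--     n = len(words)
--     if n > 3:
--         return "l"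
--     if n == 3 and len(words[1]) > 1:
--         words[1] = words[1].strip('.')
--     for toks, label in PATTERNS.get(n, []):
--         if _matches(local, words, toks):
--             return label
--     return "z"
-- ===== Notes on version B (the rewrite author's own statement) =====
-- stated objective: alternative
-- what changed: A's if/elif chain of constructed-candidate string equalities is replaced by a small pattern interpreter: each naming pattern is a token sequence (word / initial / literal separator) and a cursor-based matcher consumes the email local part piece by piece with startswith-at-offset, so no candidate strings are built and no whole-string comparisons are made.
import Mathlib
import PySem

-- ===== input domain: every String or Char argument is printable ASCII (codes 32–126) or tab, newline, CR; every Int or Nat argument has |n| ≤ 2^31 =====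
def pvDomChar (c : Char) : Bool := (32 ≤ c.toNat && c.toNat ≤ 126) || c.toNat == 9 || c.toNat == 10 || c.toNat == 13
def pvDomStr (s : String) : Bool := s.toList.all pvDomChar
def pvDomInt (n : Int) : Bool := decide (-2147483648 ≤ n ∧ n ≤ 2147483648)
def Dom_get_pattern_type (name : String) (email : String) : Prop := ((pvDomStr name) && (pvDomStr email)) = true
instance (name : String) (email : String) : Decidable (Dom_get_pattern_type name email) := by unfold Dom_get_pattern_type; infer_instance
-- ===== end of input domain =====

-- B replaces A's if/elif chain of constructed-candidate equality tests by a pattern interpreter: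
-- each pattern is a token list (word/initial/literal) and a cursor-based matcher consumes the
-- email local part piece by piece (objective: alternative; same cost).

-- ===== PORT A =====
-- Python s[0] as a 1-char string; "" stands for the IndexError case (s = ""), excluded by Pre_.
def pvChr0 (s : String) : String :=
  match s.toList with
  | [] => ""
  | c :: _ => String.ofList [c]

def get_pattern_type (name : String) (email : String) : String :=
  let nm := PySem.Str.lower name
  let loc := PySem.Str.lower (((PySem.Str.split? email "@").getD []).headD "")
  match PySem.Str.split₀ nm with
  | [w0] => if w0 = loc then "a1" else "z"
  | [w0, w1] =>
      if w0 ++ "." ++ w1 = loc then "b1"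
      else if w0 ++ "_" ++ w1 = loc then "b2"
      else if w0 ++ w1 = loc then "b3"
      else if w0 = loc then "b4"
      else if w1 = loc then "b5"
      else if pvChr0 w0 ++ w1 = loc then "b6"
      else if w0 ++ pvChr0 w1 = loc then "b7"
      else if pvChr0 w1 ++ w0 = loc then "b8"
      else if w1 ++ pvChr0 w0 = loc then "b9"
      else if PySem.Str.join "" ([w0, w1].map pvChr0) = loc then "b10"
      else "z"
  | [w0, m0, w2] =>
      let w1 := if 1 < PySem.Str.len m0 then PySem.Str.stripChars m0 "." else m0
      if w0 ++ "." ++ w2 = loc then "c1"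
      else if w0 ++ "_" ++ w2 = loc then "c2"
      else if w0 ++ w2 = loc then "c3"
      else if PySem.Str.join "." [w0, w1, w2] = loc then "c4"
      else if PySem.Str.join "_" [w0, w1, w2] = loc then "c5"
      else if PySem.Str.join "" [w0, w1, w2] = loc then "c6"
      else if w0 = loc then "c7"
      else if w2 = loc then "c8"
      else if pvChr0 w0 ++ w2 = loc then "c9"
      else if w0 ++ pvChr0 w2 = loc then "c10"
      else if pvChr0 w2 ++ w0 = loc then "c11"
      else if w2 ++ pvChr0 w0 = loc then "c12"
      else if pvChr0 w0 ++ pvChr0 w1 ++ w2 = loc then "c13"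
      else if pvChr0 w0 ++ w1 ++ w2 = loc then "c14"
      else if PySem.Str.join "." [w0, pvChr0 w1, w2] = loc then "c15"
      else if w0 ++ "." ++ w1 ++ w2 = loc then "c16"
      else if PySem.Str.join "" ([w0, w1, w2].map pvChr0) = loc then "c17"
      else "z"
  | ws => if 3 < ws.length then "l" else "z"

-- ===== PORT B =====
-- token kinds of Source B: (W, i) full word, (I, i) first character, (L, s) literal separator
inductive PvTok : Type
  | w : Nat → PvTok
  | ini : Nat → PvTok
  | lit : String → PvTok
deriving DecidableEq, Repr

-- the piece a token denotes: words[v], words[v][:1] or the literal (indices in the tables are in range)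
def pvPiece (ws : List String) : PvTok → String
  | .lit s => s
  | .w i => ws.getD i ""
  | .ini i => PySem.Str.slice (ws.getD i "") none (some 1)

-- _matches: cursor walk; local.startswith(piece, pos) is 'piece is a prefix of local[pos:]', exact on lists
def pvMatchGo (loc : List Char) (ws : List String) : Nat → List PvTok → Bool
  | pos, [] => pos == loc.length
  | pos, t :: ts =>
      let p := (pvPiece ws t).toList
      if p.isPrefixOf (loc.drop pos) then pvMatchGo loc ws (pos + p.length) ts else false

def pvMatches (loc : String) (ws : List String) (toks : List PvTok) : Bool :=
  pvMatchGo loc.toList ws 0 toks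

-- PATTERNS table
def pvPatterns (n : Nat) : List (List PvTok × String) :=
  match n with
  | 1 => [([.w 0], "a1")]
  | 2 => [([.w 0, .lit ".", .w 1], "b1"), ([.w 0, .lit "_", .w 1], "b2"),
          ([.w 0, .w 1], "b3"), ([.w 0], "b4"), ([.w 1], "b5"),
          ([.ini 0, .w 1], "b6"), ([.w 0, .ini 1], "b7"),
          ([.ini 1, .w 0], "b8"), ([.w 1, .ini 0], "b9"),
          ([.ini 0, .ini 1], "b10")]
  | 3 => [([.w 0, .lit ".", .w 2], "c1"), ([.w 0, .lit "_", .w 2], "c2"),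
          ([.w 0, .w 2], "c3"),
          ([.w 0, .lit ".", .w 1, .lit ".", .w 2], "c4"),
          ([.w 0, .lit "_", .w 1, .lit "_", .w 2], "c5"),
          ([.w 0, .w 1, .w 2], "c6"), ([.w 0], "c7"), ([.w 2], "c8"),
          ([.ini 0, .w 2], "c9"), ([.w 0, .ini 2], "c10"),
          ([.ini 2, .w 0], "c11"), ([.w 2, .ini 0], "c12"),
          ([.ini 0, .ini 1, .w 2], "c13"), ([.ini 0, .w 1, .w 2], "c14"),
          ([.w 0, .lit ".", .ini 1, .lit ".", .w 2], "c15"),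
          ([.w 0, .lit ".", .w 1, .w 2], "c16"),
          ([.ini 0, .ini 1, .ini 2], "c17")]
  | _ => []

-- the for-loop over the patterns: first matching pattern's label, else "z"
def pvScanB (loc : String) (ws : List String) : List (List PvTok × String) → String
  | [] => "z"
  | (toks, lab) :: t => if pvMatches loc ws toks then lab else pvScanB loc ws t

def get_pattern_type_alt (name : String) (email : String) : String :=
  let loc := PySem.Str.lower (((PySem.Str.split? email "@").getD []).headD "")
  let ws := PySem.Str.split₀ (PySem.Str.lower name)
  if 3 < ws.length then "l"
  else
    let ws' := if ws.length = 3 ∧ 1 < (ws.getD 1 "").toList.length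
               then ws.set 1 (PySem.Str.stripChars (ws.getD 1 "") ".")
               else ws
    pvScanB loc ws' (pvPatterns ws.length)

-- ===== PRECONDITION & SPEC =====
-- A raises IndexError (evaluating name[1][0] after stripping the middle word to "") exactly when
-- the name has 3 words, the middle word is two or more characters that are all dots, and none of
-- the 12 patterns checked before c13 matches the email local part; Pre_ excludes exactly those inputs.
def pvRaiseCond (name : String) (email : String) : Prop :=
  let ws := PySem.Str.split₀ (PySem.Str.lower name)
  let loc := PySem.Str.lower (((PySem.Str.split? email "@").getD []).headD "")
  let f := ws.getD 0 ""
  let l := ws.getD 2 ""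
  ws.length = 3 ∧ 1 < (ws.getD 1 "").toList.length ∧
  (ws.getD 1 "").toList.all (· = '.') = true ∧
  f ++ "." ++ l ≠ loc ∧ f ++ "_" ++ l ≠ loc ∧ f ++ l ≠ loc ∧
  f ++ ".." ++ l ≠ loc ∧ f ++ "__" ++ l ≠ loc ∧
  f ≠ loc ∧ l ≠ loc ∧
  pvChr0 f ++ l ≠ loc ∧ f ++ pvChr0 l ≠ loc ∧
  pvChr0 l ++ f ≠ loc ∧ l ++ pvChr0 f ≠ loc

def Pre_get_pattern_type (name : String) (email : String) : Prop := ¬ pvRaiseCond name email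
instance (name : String) (email : String) : Decidable (Pre_get_pattern_type name email) := by
  unfold Pre_get_pattern_type pvRaiseCond; infer_instance

def pvWitness_get_pattern_type : String × String := ("John Smith", "john.smith@mail.com")

def Spec_get_pattern_type (name : String) (email : String) (out : String) : Prop := out = get_pattern_type_alt name email
instance (name : String) (email : String) (out : String) : Decidable (Spec_get_pattern_type name email out) := by unfold Spec_get_pattern_type; infer_instance

-- ===== CLAIM (what is proved, stated in full; the proofs are below) =====
def Claim_equal_get_pattern_type : Prop := ∀ (name : String) (email : String), Dom_get_pattern_type name email → Pre_get_pattern_type name email → Spec_get_pattern_type name email (get_pattern_type name email)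

-- ===== LEMMAS AND PROOFS =====

-- the cursor matcher accepts iff the rest of the local part is exactly the pieces concatenated
theorem pvMatchGo_iff (loc : List Char) (ws : List String) (toks : List PvTok) (i : Nat) :
    pvMatchGo loc ws i toks = true ↔
      (i ≤ loc.length ∧ loc.drop i = (toks.map fun t => (pvPiece ws t).toList).flatten) := by
  induction toks generalizing i with
  | nil =>
      simp [pvMatchGo, List.drop_eq_nil_iff]
      omega
  | cons t ts ih =>
      simp only [pvMatchGo, List.map_cons, List.flatten_cons]
      by_cases h : (pvPiece ws t).toList.isPrefixOf (loc.drop i)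
      · rw [if_pos h, ih]
        rw [List.isPrefixOf_iff_prefix] at h
        obtain ⟨r, hr⟩ := h
        have hdd : loc.drop (i + (pvPiece ws t).toList.length)
            = (loc.drop i).drop (pvPiece ws t).toList.length := by
          rw [List.drop_drop, Nat.add_comm]
        have hr2 : loc.drop (i + (pvPiece ws t).toList.length) = r := by
          rw [hdd, ← hr, List.drop_left]
        constructor
        · rintro ⟨h1, h2⟩
          exact ⟨by omega, by rw [← hr, hr2.symm.trans h2]⟩
        · rintro ⟨h1, h2⟩
          have hcancel : r = (List.map (fun t => (pvPiece ws t).toList) ts).flatten :=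
            List.append_cancel_left (hr.trans h2)
          have hlen : (loc.drop i).length = ((pvPiece ws t).toList ++
              (List.map (fun t => (pvPiece ws t).toList) ts).flatten).length := by rw [h2]
          rw [List.length_drop, List.length_append] at hlen
          exact ⟨by omega, by rw [hr2, hcancel]⟩
      · rw [if_neg h]
        rw [List.isPrefixOf_iff_prefix] at h
        simp only [Bool.false_eq_true, false_iff, not_and]
        intro _ h2
        exact absurd ⟨_, h2.symm⟩ h

theorem pvMatches_iff (loc : String) (ws : List String) (toks : List PvTok) :
    pvMatches loc ws toks = true ↔
      (toks.map fun t => (pvPiece ws t).toList).flatten = loc.toList := by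
  rw [pvMatches, pvMatchGo_iff]
  simp [eq_comm]

-- s[0] (as A writes it, total only outside Pre_) equals s[:1]
theorem pvChr0_eq (s : String) : pvChr0 s = PySem.Str.slice s none (some 1) := by
  apply String.toList_inj.mp
  rw [PySem.Str.toList_slice, PySem.Chars.slice_eq_listSlice,
      PySem.List.slice_to (xs := s.toList) (b := 1) (by norm_num)]
  unfold pvChr0
  cases s.toList <;> simp

theorem get_pattern_type_eq (name email : String) :
    get_pattern_type name email = get_pattern_type_alt name email := by
  simp only [get_pattern_type, get_pattern_type_alt]
  rcases h : PySem.Str.split₀ (PySem.Str.lower name) with _ | ⟨w0, _ | ⟨w1, _ | ⟨w2, _ | ⟨w3, rest⟩⟩⟩⟩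
  · simp [pvScanB, pvPatterns]
  · simp [pvScanB, pvPatterns, pvMatches_iff, pvPiece, ← String.toList_inj]
  · simp [pvScanB, pvPatterns, pvMatches_iff, pvPiece, pvChr0_eq,
          ← String.toList_inj, PySem.Str.join, PySem.Chars.join, List.intercalate]
  · by_cases hm : 1 < w1.length <;>
      simp [pvScanB, pvPatterns, pvMatches_iff, pvPiece, pvChr0_eq, hm,
            ← String.toList_inj, PySem.Str.join, PySem.Chars.join, List.intercalate]
  · simp

-- ===== VERDICT (by name: the statement is the Claim_ definition above) =====
theorem get_pattern_type_spec : Claim_equal_get_pattern_type := by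
  intro name email _ _
  exact get_pattern_type_eq name email
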